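-- pv_equiv track=rewrite | github.com/wzthu/NeuronMotif | nm/DeepSEA/DD-10/build_tree.py | list_all
-- ===== SOURCE A (Python) =====
-- def list_all(lst, x = 0, x_pos=[]):
--     if x == 0:
--         one_lst = lst.copy()
--         for i in range(len(x_pos)-1,-1,-1):
--             one_lst.insert(x_pos[i],'X')
--         return [one_lst]
--     lst_lst = []
--     for i in range(len(lst)+1):
--         new_x_pos = x_pos.copy()
--         new_x_pos.append(i)
--         lst_lst.extend(list_all(lst=lst,x=x-1,x_pos=new_x_pos))
--     return lst_lst
-- ===== SOURCE B (Python) =====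
-- import itertools
--
-- def list_all(lst, x = 0, x_pos=[]):
--     n = len(lst) + 1
--     out = []
--     for combo in itertools.product(range(n), repeat=x):
--         positions = list(x_pos) + list(combo)
--         one = lst.copy()
--         for p in reversed(positions):
--             one.insert(p, 'X')
--         out.append(one)
--     return out
-- ===== Notes on version B (the rewrite author's own statement) =====
-- stated objective: idiomatic
-- what changed: Replaces A's one-marker-at-a-time recursion (which threads partial position lists through recursive calls) by a single flat enumeration of all position tuples with itertools.product, building each output list directly; Pre_ excludes x < 0 (A recurses forever) and x > 900 (A's recursion depth x hits CPython's recursion limit near 1000, where exactly depends on the caller's stack depth).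
import Mathlib
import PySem

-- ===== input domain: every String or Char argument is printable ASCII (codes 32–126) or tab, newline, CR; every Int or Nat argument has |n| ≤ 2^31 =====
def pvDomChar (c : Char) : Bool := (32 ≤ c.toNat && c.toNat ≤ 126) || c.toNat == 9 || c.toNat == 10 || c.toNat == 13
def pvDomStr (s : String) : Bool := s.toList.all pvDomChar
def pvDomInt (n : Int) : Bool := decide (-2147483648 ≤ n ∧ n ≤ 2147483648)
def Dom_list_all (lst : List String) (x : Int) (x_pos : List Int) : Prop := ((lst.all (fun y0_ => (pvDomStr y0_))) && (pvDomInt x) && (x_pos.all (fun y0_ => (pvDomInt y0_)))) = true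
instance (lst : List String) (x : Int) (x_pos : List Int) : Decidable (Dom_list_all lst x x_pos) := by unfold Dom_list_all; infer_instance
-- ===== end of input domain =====

-- B replaces A's one-marker-at-a-time recursion by a single enumeration of all
-- position tuples (itertools.product), building each output list directly (idiomatic).

-- ===== PORT A =====
-- the x == 0 base case: insert 'X' at x_pos[i] for i = len(x_pos)-1 .. 0
def listAllBase (lst : List String) (x_pos : List Int) : List String :=
  (PySem.List.pyRange ((x_pos.length : Int) - 1) (-1) (-1)).foldl
    (fun one i => PySem.List.insert one (PySem.List.pyGetD x_pos i 0) "X") lst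

-- A's recursion, with x.toNat as the structural fuel (Python returns only for x ≥ 0,
-- which Pre_list_all states; for x < 0 Python recurses forever)
def listAllCore (lst : List String) : Nat → List Int → List (List String)
  | 0, x_pos => [listAllBase lst x_pos]
  | n + 1, x_pos =>
      (PySem.List.pyRange 0 ((lst.length : Int) + 1) 1).foldl
        (fun acc i => acc ++ listAllCore lst n (x_pos ++ [i])) []

def list_all (lst : List String) (x : Int) (x_pos : List Int) : List (List String) :=
  listAllCore lst x.toNat x_pos

-- ===== PORT B =====
-- itertools.product(r, repeat=n) in lexicographic order
def pyProductRep (r : List Int) : Nat → List (List Int)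
  | 0 => [[]]
  | n + 1 => r.flatMap (fun i => (pyProductRep r n).map (fun t => i :: t))

-- Source B's inner loop: insert 'X' at each position, last position first
def altBuild (lst : List String) (positions : List Int) : List String :=
  positions.foldr (fun p one => PySem.List.insert one p "X") lst

def list_all_alt (lst : List String) (x : Int) (x_pos : List Int) : List (List String) :=
  (pyProductRep (PySem.List.pyRange 0 ((lst.length : Int) + 1) 1) x.toNat).foldl
    (fun out combo => out ++ [altBuild lst (x_pos ++ combo)]) []

-- ===== PRECONDITION & SPEC =====
-- Pre_ excludes x < 0, where A recurses forever (RecursionError), and x > 900, where A's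
-- recursion depth x approaches/exceeds CPython's recursion limit (~1000, RecursionError;
-- the exact cut depends on the caller's stack depth, hence the margin — A still returns
-- for some x in (900, ~995] when the output is small, see the cite in claim.json).
def Pre_list_all (lst : List String) (x : Int) (x_pos : List Int) : Prop := 0 ≤ x ∧ x ≤ 900
instance (lst : List String) (x : Int) (x_pos : List Int) : Decidable (Pre_list_all lst x x_pos) := by unfold Pre_list_all; infer_instance
def pvWitness_list_all : List String × Int × List Int := (["a", "b"], 1, [0])

def Spec_list_all (lst : List String) (x : Int) (x_pos : List Int) (out : List (List String)) : Prop := out = list_all_alt lst x x_pos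
instance (lst : List String) (x : Int) (x_pos : List Int) (out : List (List String)) : Decidable (Spec_list_all lst x x_pos out) := by unfold Spec_list_all; infer_instance

-- ===== CLAIM (what is proved, stated in full; the proofs are below) =====
def Claim_equal_list_all : Prop := ∀ (lst : List String) (x : Int) (x_pos : List Int), Dom_list_all lst x x_pos → Pre_list_all lst x x_pos → Spec_list_all lst x x_pos (list_all lst x x_pos)

-- ===== LEMMAS AND PROOFS =====

-- A's backwards insertion loop equals B's foldr over the positions list
theorem listAllBase_eq_altBuild (lst : List String) (x_pos : List Int) :
    listAllBase lst x_pos = altBuild lst x_pos := by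
  unfold listAllBase altBuild
  rw [PySem.List.pyRange_neg_one_eq_reverse]
  have h0 : ((-1 : Int) + 1) = 0 := by ring
  have h1 : ((x_pos.length : Int) - 1 + 1) = (x_pos.length : Int) := by ring
  rw [h0, h1, List.foldl_reverse]
  conv_rhs => rw [← PySem.List.map_pyGetD_pyRange_zero x_pos 0, List.foldr_map]
  simp [PySem.List.len_eq]

theorem listAllCore_eq (lst : List String) (n : Nat) (x_pos : List Int) :
    listAllCore lst n x_pos =
      (pyProductRep (PySem.List.pyRange 0 ((lst.length : Int) + 1) 1) n).map
        (fun c => altBuild lst (x_pos ++ c)) := by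
  induction n generalizing x_pos with
  | zero => simp [listAllCore, pyProductRep, listAllBase_eq_altBuild]
  | succ n ih =>
      rw [listAllCore, PySem.List.foldl_append_eq_flatMap]
      simp only [pyProductRep, List.map_flatMap, List.map_map, List.nil_append]
      refine List.flatMap_congr (fun i _ => ?_)
      rw [ih]
      simp [Function.comp_def]

-- ===== VERDICT (by name: the statement is the Claim_ definition above) =====
theorem list_all_spec : Claim_equal_list_all := by
  intro lst x x_pos _ _
  unfold Spec_list_all list_all list_all_alt
  rw [PySem.List.foldl_append_singleton_eq_map, List.nil_append]
  exact listAllCore_eq lst x.toNat x_pos
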